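/- GENERATED by farm/mkstatement.py from design/units.split.tsv — do not edit.
   THE SPLIT of the proof unit `start_decoder.2` into `start_decoder.2a`, `start_decoder.2b`, `start_decoder.2c`, `start_decoder.2d`: the children's statements give the parent's
   UNCHANGED statement (so nothing above the parent — callers, compositions — is touched by the split). -/
import Vorbis.Spec.StartDecoder2
import Vorbis.Spec.Units.start_decoder_2
import Vorbis.Spec.Units.start_decoder_2a
import Vorbis.Spec.Units.start_decoder_2b
import Vorbis.Spec.Units.start_decoder_2c
import Vorbis.Spec.Units.start_decoder_2d
namespace Vorbis.Spec.Splits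
open X86 X86.User Asan

/-- The children of the split unit `start_decoder.2` prove it, by `Vorbis.Spec.StartDecoder.Seg2.of_parts`. -/
theorem start_decoder_2
    (h_start_decoder_2a : Vorbis.Spec.start_decoder_2a.Statement)
    (h_start_decoder_2b : Vorbis.Spec.start_decoder_2b.Statement)
    (h_start_decoder_2c : Vorbis.Spec.start_decoder_2c.Statement)
    (h_start_decoder_2d : Vorbis.Spec.start_decoder_2d.Statement) :
    Vorbis.Spec.start_decoder_2.Statement := by
  intro Lay _hLay μ _hμ u₀ _hcode _h_asan_store1_noabort _h_start_page _h_asan_load1_noabort _h_asan_load4_noabort _h_getn _h_error _h_get8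
  apply Vorbis.Spec.StartDecoder.Seg2.of_parts
  · exact h_start_decoder_2a Lay _hLay μ _hμ u₀ _hcode _h_asan_store1_noabort _h_start_page
  · exact h_start_decoder_2b Lay _hLay μ _hμ u₀ _hcode _h_asan_load1_noabort _h_asan_load4_noabort _h_getn _h_get8
  · exact h_start_decoder_2c Lay _hLay μ _hμ u₀ _hcode _h_get8
  · exact h_start_decoder_2d Lay _hLay μ _hμ u₀ _hcode _h_error

end Vorbis.Spec.Splits
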